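-- pv_equiv track=rewrite | github.com/guimochi/advent_of_code2023 | day13/part1.py | ref_row
-- ===== SOURCE A (Python) =====
-- def ref_row(blocks):
--     nb_row = 0
--     for block in blocks:
--         # retain which line is where
--         r_line: {int: str} = {}
--         # row of possible reflection
--         possible_center: [int] = []
--         # add everything
--         for r, line in enumerate(block[1:], 1):
--             r_line[r] = block[r]
--             r_line[r - 1] = block[r - 1]
--             if block[r] == block[r - 1]:
--                 possible_center.append(r)
--
--         # iter to look for reflexion
--         for center in possible_center:
--             up = center
--             down = center - 1
--             valid = True
--             while down >= 0 and up < len(block):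
--                 if r_line[up] != r_line[down]:
--                     valid = False
--                     break
--                 up += 1
--                 down -= 1
--             if valid:
--                 nb_row += center
--
--     return nb_row
--     pass
-- ===== SOURCE B (Python) =====
-- def ref_row(blocks):
--     total = 0
--     for block in blocks:
--         n = len(block)
--         for c in range(1, n):
--             m = min(c, n - c)
--             if list(reversed(block[c - m:c])) == block[c:c + m]:
--                 total += c
--     return total
-- ===== Notes on version B (the rewrite author's own statement) =====
-- stated objective: simpler
-- what changed: Replaces A's dict-of-rows plus candidate-center prefilter and explicit expand-outwards while loop by a direct mirror-slice comparison: for each cut c the reversed prefix slice of width min(c, n-c) is compared with the suffix slice in one list equality.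
import Mathlib
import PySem

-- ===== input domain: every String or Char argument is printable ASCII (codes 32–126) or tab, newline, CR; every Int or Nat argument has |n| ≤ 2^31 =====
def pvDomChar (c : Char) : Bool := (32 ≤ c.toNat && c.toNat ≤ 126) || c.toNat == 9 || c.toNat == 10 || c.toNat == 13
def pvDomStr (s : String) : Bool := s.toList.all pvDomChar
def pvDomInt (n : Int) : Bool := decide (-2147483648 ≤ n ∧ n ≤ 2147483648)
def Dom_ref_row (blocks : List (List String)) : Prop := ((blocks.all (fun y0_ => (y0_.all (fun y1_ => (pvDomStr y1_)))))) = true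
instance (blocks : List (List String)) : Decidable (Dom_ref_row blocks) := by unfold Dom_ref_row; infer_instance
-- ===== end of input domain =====

-- B replaces A's row-dict + candidate prefilter + expand-outwards while loop by a direct
-- mirror-slice comparison at every cut; same exact result, a different (simpler) decomposition.


-- ===== PORT A =====
-- A's inner while loop: expand from the center while rows match
-- (r_line[up] / r_line[down] ported as getD "": A only queries keys 0..len-1, all present).
def refWhile (d : PySem.Dict Int String) (n : Int) (up down : Int) : Bool :=
  if 0 ≤ down ∧ up < n then
    if d.getD up "" ≠ d.getD down "" then false
    else refWhile d n (up + 1) (down - 1)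
  else true
termination_by (down + 1).toNat
decreasing_by omega

-- the body of A's outer 'for block in blocks' loop
def refBlock (nb : Int) (block : List String) : Int :=
  let st := (PySem.List.enumerate (PySem.List.slice block (some 1) none) 1).foldl
    (fun (st : PySem.Dict Int String × List Int) rl =>
      ((st.1.insert rl.1 (PySem.List.pyGetD block rl.1 "")).insert (rl.1 - 1)
          (PySem.List.pyGetD block (rl.1 - 1) ""),
       if PySem.List.pyGetD block rl.1 "" == PySem.List.pyGetD block (rl.1 - 1) ""
       then st.2 ++ [rl.1] else st.2))
    (PySem.Dict.empty, [])
  st.2.foldl (fun nb c => if refWhile st.1 (PySem.List.len block) c (c - 1) then nb + c else nb) nb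

def ref_row (blocks : List (List String)) : Int := blocks.foldl refBlock 0

-- ===== PORT B =====
def ref_row_alt (blocks : List (List String)) : Int :=
  blocks.foldl (fun total block =>
    (PySem.List.pyRange 1 (PySem.List.len block) 1).foldl (fun t c =>
      let m := min c (PySem.List.len block - c)
      if (PySem.List.slice block (some (c - m)) (some c)).reverse
          = PySem.List.slice block (some c) (some (c + m))
      then t + c else t) total) 0

-- ===== PRECONDITION & SPEC =====
def Spec_ref_row (blocks : List (List String)) (out : Int) : Prop := out = ref_row_alt blocks
instance (blocks : List (List String)) (out : Int) : Decidable (Spec_ref_row blocks out) := by unfold Spec_ref_row; infer_instance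

-- ===== CLAIM (what is proved, stated in full; the proofs are below) =====
def Claim_equal_ref_row : Prop := ∀ (blocks : List (List String)), Dom_ref_row blocks → Spec_ref_row blocks (ref_row blocks)

-- ===== LEMMAS AND PROOFS =====

theorem dictFold_getD (block : List String) (rs : List (Int × String))
    (d : PySem.Dict Int String) (k : Int) :
    ((rs.foldl (fun d (rl : Int × String) =>
        (d.insert rl.1 (PySem.List.pyGetD block rl.1 "")).insert (rl.1 - 1)
          (PySem.List.pyGetD block (rl.1 - 1) "")) d).getD k "")
    = if ∃ p ∈ rs, k = p.1 ∨ k = p.1 - 1 then PySem.List.pyGetD block k ""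
      else d.getD k "" := by
  induction rs generalizing d with
  | nil => simp
  | cons rl rs ih =>
    simp only [List.foldl_cons, ih]
    by_cases h1 : ∃ p ∈ rs, k = p.1 ∨ k = p.1 - 1
    · rw [if_pos h1, if_pos (by obtain ⟨p, hp, h⟩ := h1; exact ⟨p, List.mem_cons_of_mem _ hp, h⟩)]
    · rw [if_neg h1, PySem.Dict.getD_insert, PySem.Dict.getD_insert]
      by_cases hA : k = rl.1 - 1
      · rw [if_pos hA, if_pos ⟨rl, List.mem_cons_self, Or.inr hA⟩, hA]
      · rw [if_neg hA]
        by_cases hB : k = rl.1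
        · rw [if_pos hB, if_pos ⟨rl, List.mem_cons_self, Or.inl hB⟩, hB]
        · rw [if_neg hB, if_neg (fun h => by
            obtain ⟨p, hp, h⟩ := h
            rcases List.mem_cons.mp hp with h' | h'
            · subst h'; tauto
            · exact h1 ⟨p, h', h⟩)]

theorem refWhile_iff (d : PySem.Dict Int String) (block : List String) (c : Int)
    (hd : ∀ k : Int, 0 ≤ k → k < (block.length : Int) → d.getD k "" = PySem.List.pyGetD block k "") :
    ∀ fuel : Nat, ∀ up : Int, c ≤ up → (2*c - up).toNat ≤ fuel →
      (refWhile d (block.length : Int) up (2*c - 1 - up) = true ↔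
        ∀ j : Int, up ≤ j → j < (block.length : Int) → 0 ≤ 2*c - 1 - j →
          PySem.List.pyGetD block j "" = PySem.List.pyGetD block (2*c - 1 - j) "") := by
  intro fuel
  induction fuel with
  | zero =>
    intro up hup hf
    rw [refWhile, if_neg (by omega)]
    simp only [true_iff]
    intro j h1 h2 h3
    omega
  | succ fuel ih =>
    intro up hup hf
    rw [refWhile]
    by_cases hcond : 0 ≤ 2*c - 1 - up ∧ up < (block.length : Int)
    · rw [if_pos hcond]
      rw [hd up (by omega) (by omega), hd (2*c - 1 - up) (by omega) (by omega)]
      by_cases heq : PySem.List.pyGetD block up "" = PySem.List.pyGetD block (2*c - 1 - up) ""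
      · rw [if_neg (fun h => h heq)]
        have h2 : 2*c - 1 - (up + 1) = 2*c - 1 - up - 1 := by omega
        rw [show (2*c - 1 - up - 1) = 2*c - 1 - (up + 1) by omega]
        rw [ih (up + 1) (by omega) (by omega)]
        constructor
        · intro h j h1 h2 h3
          rcases eq_or_lt_of_le h1 with h' | h'
          · subst h'; exact heq
          · exact h j (by omega) h2 h3
        · intro h j h1 h2 h3
          exact h j (by omega) h2 h3
      · rw [if_pos heq]
        simp only [Bool.false_eq_true, false_iff]
        intro h
        exact heq (h up (le_refl _) (by omega) (by omega))
    · rw [if_neg hcond]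
      simp only [true_iff]
      intro j h1 h2 h3
      have : j = up ∨ up < j := by omega
      omega


theorem revseg_eq_iff (l : List String) (a mN cN : Nat) (ha : a + mN = cN) (h2 : cN + mN ≤ l.length) :
    (((l.drop a).take mN).reverse = (l.drop cN).take mN) ↔
      ∀ i : Nat, i < mN → l[cN - 1 - i]? = l[cN + i]? := by
  have hL1 : ∀ i : Nat, i < mN → (((l.drop a).take mN).reverse)[i]? = l[cN - 1 - i]? := by
    intro i hi
    have hlen : ((l.drop a).take mN).length = mN := by
      simp [List.length_take, List.length_drop]; omega
    rw [List.getElem?_reverse (by omega), hlen,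
        List.getElem?_take_of_lt (by omega), List.getElem?_drop]
    congr 1; omega
  have hL2 : ∀ i : Nat, i < mN → ((l.drop cN).take mN)[i]? = l[cN + i]? := by
    intro i hi
    rw [List.getElem?_take_of_lt hi, List.getElem?_drop]
  constructor
  · intro h i hi
    rw [← hL1 i hi, ← hL2 i hi, h]
  · intro h
    apply List.ext_getElem?
    intro i
    by_cases hi : i < mN
    · rw [hL1 i hi, hL2 i hi, h i hi]
    · rw [List.getElem?_eq_none, List.getElem?_eq_none]
      · simp [List.length_take, List.length_drop]; omega
      · simp [List.length_take, List.length_drop]; omega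

theorem slice_good_iff (block : List String) (c : Int)
    (hc1 : 1 ≤ c) (hc2 : c < (block.length : Int)) :
    ((PySem.List.slice block (some (c - min c ((block.length : Int) - c))) (some c)).reverse
      = PySem.List.slice block (some c) (some (c + min c ((block.length : Int) - c)))) ↔
    (∀ j : Int, c ≤ j → j < (block.length : Int) → 0 ≤ 2*c - 1 - j →
      PySem.List.pyGetD block j "" = PySem.List.pyGetD block (2*c - 1 - j) "") := by
  rw [PySem.List.slice_toNat _ (by omega) (by omega),
      PySem.List.slice_toNat _ (by omega) (by omega)]
  rw [show c.toNat - (c - min c ((block.length : Int) - c)).toNat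
        = (min c ((block.length : Int) - c)).toNat from by omega,
      show (c + min c ((block.length : Int) - c)).toNat - c.toNat
        = (min c ((block.length : Int) - c)).toNat from by omega]
  rw [revseg_eq_iff block (c - min c ((block.length : Int) - c)).toNat
        (min c ((block.length : Int) - c)).toNat c.toNat (by omega) (by omega)]
  constructor
  · intro h j hj1 hj2 hj3
    have hi : (j - c).toNat < (min c ((block.length : Int) - c)).toNat := by omega
    have hh := h (j - c).toNat hi
    rw [show c.toNat - 1 - (j - c).toNat = (2*c - 1 - j).toNat from by omega,
        show c.toNat + (j - c).toNat = j.toNat from by omega] at hh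
    rw [PySem.List.pyGetD_eq_getElem _ _ (by omega) (by omega),
        PySem.List.pyGetD_eq_getElem _ _ (by omega) (by omega)]
    rw [List.getElem?_eq_getElem (by omega), List.getElem?_eq_getElem (by omega)] at hh
    exact (Option.some_inj.mp hh).symm
  · intro h i hi
    have hh := h (c + i) (by omega) (by omega) (by omega)
    rw [PySem.List.pyGetD_eq_getElem _ _ (by omega) (by omega),
        PySem.List.pyGetD_eq_getElem _ _ (by omega) (by omega)] at hh
    simp only [show (c + (i:Int)).toNat = c.toNat + i from by omega,
        show (2*c - 1 - (c + i)).toNat = c.toNat - 1 - i from by omega] at hh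
    rw [List.getElem?_eq_getElem (by omega), List.getElem?_eq_getElem (by omega)]
    exact congrArg some hh.symm


theorem refBlock_eq (block : List String) (nb : Int) :
    refBlock nb block =
    (PySem.List.pyRange 1 (PySem.List.len block) 1).foldl (fun t c =>
      let m := min c (PySem.List.len block - c)
      if (PySem.List.slice block (some (c - m)) (some c)).reverse
          = PySem.List.slice block (some c) (some (c + m))
      then t + c else t) nb := by
  cases block with
  | nil => rfl
  | cons hB tB =>
    unfold refBlock
    rw [PySem.List.slice_from_one,
        PySem.List.foldl_prod_mk
          (f := fun (d : PySem.Dict Int String) (rl : Int × String) =>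
            (d.insert rl.1 (PySem.List.pyGetD (hB :: tB) rl.1 "")).insert (rl.1 - 1)
              (PySem.List.pyGetD (hB :: tB) (rl.1 - 1) ""))
          (g := fun (acc : List Int) (rl : Int × String) =>
            if PySem.List.pyGetD (hB :: tB) rl.1 "" == PySem.List.pyGetD (hB :: tB) (rl.1 - 1) ""
            then acc ++ [rl.1] else acc)]
    simp only [List.tail_cons, PySem.List.foldl_append_if, List.nil_append, PySem.List.len_eq]
    rw [show List.map Prod.fst
          (List.filter (fun x : Int × String => PySem.List.pyGetD (hB :: tB) x.1 "" == PySem.List.pyGetD (hB :: tB) (x.1 - 1) "")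
            (PySem.List.enumerate tB 1))
        = List.filter (fun c : Int => PySem.List.pyGetD (hB :: tB) c "" == PySem.List.pyGetD (hB :: tB) (c - 1) "")
            (List.map Prod.fst (PySem.List.enumerate tB 1)) from by rw [List.filter_map]; rfl,
        PySem.List.map_fst_enumerate,
        show (1 : Int) + (tB.length : Int) = ((hB :: tB).length : Int) from by simp; omega]
    refine Eq.trans (PySem.List.foldl_if_eq_foldl_filter
        (fun c => refWhile (List.foldl (fun (d : PySem.Dict Int String) (rl : Int × String) =>
          (d.insert rl.1 (PySem.List.pyGetD (hB :: tB) rl.1 "")).insert (rl.1 - 1)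
            (PySem.List.pyGetD (hB :: tB) (rl.1 - 1) "")) PySem.Dict.empty (PySem.List.enumerate tB 1))
          (((hB :: tB).length : Int)) c (c - 1)) (fun (a c : Int) => a + c) _ nb) ?_
    refine Eq.trans ?_ (PySem.List.foldl_ite_eq_foldl_filter
        (fun c : Int =>
          (PySem.List.slice (hB :: tB) (some (c - min c ((((hB :: tB).length) : Int) - c))) (some c)).reverse
            = PySem.List.slice (hB :: tB) (some c) (some (c + min c ((((hB :: tB).length) : Int) - c))))
        (fun (a c : Int) => a + c) _ nb).symm
    rw [List.filter_filter]

    refine congrArg (List.foldl (fun (a c : Int) => a + c) nb) ?_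
    apply List.filter_congr
    intro c hc
    rw [PySem.List.mem_pyRange_one] at hc
    have hlen : ((hB :: tB).length : Int) = (tB.length : Int) + 1 := by simp
    have hd : ∀ k : Int, 0 ≤ k → k < ((hB :: tB).length : Int) →
        PySem.Dict.getD (List.foldl (fun (d : PySem.Dict Int String) (rl : Int × String) =>
          (d.insert rl.1 (PySem.List.pyGetD (hB :: tB) rl.1 "")).insert (rl.1 - 1)
            (PySem.List.pyGetD (hB :: tB) (rl.1 - 1) "")) PySem.Dict.empty (PySem.List.enumerate tB 1)) k "" = PySem.List.pyGetD (hB :: tB) k "" := by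
      intro k h0 hk
      rw [dictFold_getD, if_pos ?_]
      by_cases h1k : 1 ≤ k
      · refine ⟨(1 + ((k.toNat - 1 : Nat) : Int), tB[k.toNat - 1]'(by omega)),
          (PySem.List.mem_enumerate_iff _ _ _).mpr ⟨k.toNat - 1, by omega, rfl⟩,
          Or.inl (by omega)⟩
      · refine ⟨(1 + ((0 : Nat) : Int), tB[0]'(by omega)),
          (PySem.List.mem_enumerate_iff _ _ _).mpr ⟨0, by omega, rfl⟩,
          Or.inr (by omega)⟩
    have hW := refWhile_iff (List.foldl (fun (d : PySem.Dict Int String) (rl : Int × String) =>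
          (d.insert rl.1 (PySem.List.pyGetD (hB :: tB) rl.1 "")).insert (rl.1 - 1)
            (PySem.List.pyGetD (hB :: tB) (rl.1 - 1) "")) PySem.Dict.empty (PySem.List.enumerate tB 1)) (hB :: tB) c hd c.toNat c le_rfl (by omega)
    rw [show 2*c - 1 - c = c - 1 from by omega] at hW
    have hS := slice_good_iff (hB :: tB) c (by omega) (by omega)
    by_cases hPW : ∀ j : Int, c ≤ j → j < ((hB :: tB).length : Int) → 0 ≤ 2*c - 1 - j →
        PySem.List.pyGetD (hB :: tB) j "" = PySem.List.pyGetD (hB :: tB) (2*c - 1 - j) ""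
    · have e1 := hW.mpr hPW
      have e2 := hS.mpr hPW
      have hq := hPW c le_rfl (by omega) (by omega)
      rw [show 2*c - 1 - c = c - 1 from by omega] at hq
      simp only [List.length_cons, Nat.cast_add, Nat.cast_one] at e1 e2 hq ⊢
      simp [e1, e2, hq]
    · have h1 : refWhile (List.foldl (fun (d : PySem.Dict Int String) (rl : Int × String) =>
          (d.insert rl.1 (PySem.List.pyGetD (hB :: tB) rl.1 "")).insert (rl.1 - 1)
            (PySem.List.pyGetD (hB :: tB) (rl.1 - 1) "")) PySem.Dict.empty (PySem.List.enumerate tB 1)) (((hB :: tB).length : Int)) c (c - 1) = false := by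
        rcases Bool.eq_false_or_eq_true (refWhile (List.foldl (fun (d : PySem.Dict Int String) (rl : Int × String) =>
          (d.insert rl.1 (PySem.List.pyGetD (hB :: tB) rl.1 "")).insert (rl.1 - 1)
            (PySem.List.pyGetD (hB :: tB) (rl.1 - 1) "")) PySem.Dict.empty (PySem.List.enumerate tB 1)) (((hB :: tB).length : Int)) c (c - 1)) with h | h
        · exact absurd (hW.mp h) hPW
        · exact h
      have h2 : ¬ ((PySem.List.slice (hB :: tB) (some (c - min c ((((hB :: tB).length) : Int) - c))) (some c)).reverse
              = PySem.List.slice (hB :: tB) (some c) (some (c + min c ((((hB :: tB).length) : Int) - c)))) :=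
        fun hg => hPW (hS.mp hg)
      simp only [List.length_cons, Nat.cast_add, Nat.cast_one] at h1 h2 ⊢
      simp [h1, h2]

-- ===== VERDICT (by name: the statement is the Claim_ definition above) =====
theorem ref_row_spec : Claim_equal_ref_row := by
  intro blocks _
  show ref_row blocks = ref_row_alt blocks
  unfold ref_row ref_row_alt
  exact congrFun (congrFun (congrArg List.foldl
    (funext fun nb => funext fun b => refBlock_eq b nb)) 0) blocks
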